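-- pv_equiv track=rewrite | github.com/prabal-rje/latentscore | src/app/branding.py | _env_prefix
-- ===== SOURCE A (Python) =====
-- def _env_prefix(slug: str) -> str:
--     cleaned: list[str] = []
--     last_was_sep = True
--     for ch in slug:
--         if ch.isalnum():
--             cleaned.append(ch.upper())
--             last_was_sep = False
--             continue
--         if last_was_sep:
--             continue
--         cleaned.append("_")
--         last_was_sep = True
--     return "".join(cleaned).strip("_")
-- ===== SOURCE B (Python) =====
-- def _env_prefix(slug: str) -> str:
--     # Run-based scan: split the string into maximal runs of alnum / non-alnum
--     # characters, emit the upper-cased run or a single '_', then strip '_'.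
--     parts: list[str] = []
--     i = 0
--     n = len(slug)
--     while i < n:
--         j = i
--         if slug[i].isalnum():
--             while j < n and slug[j].isalnum():
--                 j += 1
--             parts.append(slug[i:j].upper())
--         else:
--             while j < n and not slug[j].isalnum():
--                 j += 1
--             parts.append("_")
--         i = j
--     return "".join(parts).strip("_")
-- ===== Notes on version B (the rewrite author's own statement) =====
-- stated objective: alternative
-- what changed: Replaces the per-character scan with a last_was_sep flag by a run-based scan that splits the slug into maximal alnum/non-alnum runs, emitting each alnum run upper-cased and one underscore per separator run, then joining and stripping.
import Mathlib
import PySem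

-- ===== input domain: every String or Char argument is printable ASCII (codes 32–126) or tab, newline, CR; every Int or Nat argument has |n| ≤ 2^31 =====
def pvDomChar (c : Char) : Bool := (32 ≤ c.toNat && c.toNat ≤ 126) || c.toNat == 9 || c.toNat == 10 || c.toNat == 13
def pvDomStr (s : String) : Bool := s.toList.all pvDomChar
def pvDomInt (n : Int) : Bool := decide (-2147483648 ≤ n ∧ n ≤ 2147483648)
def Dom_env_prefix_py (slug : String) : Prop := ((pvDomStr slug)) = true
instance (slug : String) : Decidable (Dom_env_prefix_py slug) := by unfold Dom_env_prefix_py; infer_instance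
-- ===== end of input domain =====

-- B replaces A's per-character scan with a last_was_sep flag by a run-based scan over
-- maximal alnum/non-alnum runs (alternative decomposition, same O(n) cost).

-- ===== PORT A =====
-- A's loop: state = (cleaned, last_was_sep); then "".join(cleaned).strip("_")
def env_prefix_py (slug : String) : String :=
  String.ofList (PySem.Chars.stripChars
    (slug.toList.foldl
      (fun (st : List Char × Bool) ch =>
        if PySem.Chars.isalnum ch then (st.1 ++ [PySem.Chars.upperChar ch], false)
        else if st.2 then st
        else (st.1 ++ ['_'], true))
      ([], true)).1 ['_'])

-- ===== PORT B =====
-- B's outer while loop: each step consumes one maximal run (the inner while scans,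
-- ported as takeWhile/dropWhile) and appends one part.
def envPrefixParts : List Char → List (List Char)
  | [] => []
  | c :: rest =>
    if PySem.Chars.isalnum c then
      PySem.Chars.upper (c :: rest.takeWhile PySem.Chars.isalnum)
        :: envPrefixParts (rest.dropWhile PySem.Chars.isalnum)
    else
      ['_'] :: envPrefixParts (rest.dropWhile (fun x => !PySem.Chars.isalnum x))
  termination_by cs => cs.length
  decreasing_by
    · exact Nat.lt_succ_of_le (List.length_dropWhile_le _ _)
    · exact Nat.lt_succ_of_le (List.length_dropWhile_le _ _)

def env_prefix_py_alt (slug : String) : String :=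
  String.ofList (PySem.Chars.stripChars
    (PySem.Chars.join [] (envPrefixParts slug.toList)) ['_'])

-- ===== PRECONDITION & SPEC =====
def Spec_env_prefix_py (slug : String) (out : String) : Prop := out = env_prefix_py_alt slug
instance (slug : String) (out : String) : Decidable (Spec_env_prefix_py slug out) := by unfold Spec_env_prefix_py; infer_instance

-- ===== CLAIM (what is proved, stated in full; the proofs are below) =====
def Claim_equal_env_prefix_py : Prop := ∀ (slug : String), Dom_env_prefix_py slug → Spec_env_prefix_py slug (env_prefix_py slug)

-- ===== LEMMAS AND PROOFS =====

-- A's state machine, written as a direct recursion on the remaining characters.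
def aRec : List Char → Bool → List Char
  | [], _ => []
  | c :: cs, sep =>
    if PySem.Chars.isalnum c then PySem.Chars.upperChar c :: aRec cs false
    else if sep then aRec cs true
    else '_' :: aRec cs true

-- short name for B's joined (pre-strip) output
def bJ (cs : List Char) : List Char := PySem.Chars.join [] (envPrefixParts cs)

-- drop one leading '_' if present
def dropU : List Char → List Char
  | [] => []
  | c :: t => if c = '_' then t else c :: t

lemma upperChar_ne_underscore (c : Char) (h : PySem.Chars.isalnum c = true) :
    PySem.Chars.upperChar c ≠ '_' := by
  simp only [PySem.Chars.isalnum, PySem.Chars.isalpha, PySem.Chars.isdigit, PySem.Chars.islower,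
    PySem.Chars.isupper, PySem.Chars.upperChar, Bool.or_eq_true, Bool.and_eq_true,
    decide_eq_true_eq] at *
  have hle : ∀ a b : Char, a ≤ b ↔ a.toNat ≤ b.toNat := fun a b => by
    rw [Char.le_def, UInt32.le_iff_toNat_le]; rfl
  have lA : ('A').toNat = 65 := rfl
  have lZ : ('Z').toNat = 90 := rfl
  have la : ('a').toNat = 97 := rfl
  have lz : ('z').toNat = 122 := rfl
  have l0 : ('0').toNat = 48 := rfl
  have l9 : ('9').toNat = 57 := rfl
  have lu : ('_').toNat = 95 := rfl
  simp only [hle, lA, lZ, la, lz, l0, l9] at h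
  intro hEq
  have hT := congrArg Char.toNat hEq
  split_ifs at hT with hl
  · simp only [hle, la, lz] at hl
    rw [Char.toNat_ofNat] at hT
    have hv : (c.toNat - 32).isValidChar := Or.inl (by omega)
    rw [if_pos hv, lu] at hT
    omega
  · rw [lu] at hT
    omega

lemma join_nil_cons (x : List Char) (l : List (List Char)) :
    PySem.Chars.join [] (x :: l) = x ++ PySem.Chars.join [] l := by
  cases l with
  | nil => simp [PySem.Chars.join, List.intercalate]
  | cons y t => simp [PySem.Chars.join, List.intercalate]

lemma bJ_alnum (c : Char) (cs : List Char) (h : PySem.Chars.isalnum c = true) :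
    bJ (c :: cs) = PySem.Chars.upperChar c :: bJ cs := by
  unfold bJ
  rw [envPrefixParts, if_pos h, join_nil_cons]
  cases cs with
  | nil => simp [PySem.Chars.upper, envPrefixParts]
  | cons d cs' =>
    by_cases hd : PySem.Chars.isalnum d = true
    · rw [List.takeWhile_cons_of_pos hd, List.dropWhile_cons_of_pos hd]
      rw [envPrefixParts, if_pos hd, join_nil_cons]
      simp [PySem.Chars.upper]
    · rw [List.takeWhile_cons_of_neg hd, List.dropWhile_cons_of_neg hd]
      simp [PySem.Chars.upper]

lemma bJ_sep (c : Char) (cs : List Char) (h : ¬ PySem.Chars.isalnum c = true) :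
    bJ (c :: cs) = '_' :: bJ (cs.dropWhile (fun x => !PySem.Chars.isalnum x)) := by
  unfold bJ
  rw [envPrefixParts, if_neg h, join_nil_cons]
  rfl

lemma head_bJ_ne (c : Char) (cs : List Char) (h : PySem.Chars.isalnum c = true) :
    dropU (bJ (c :: cs)) = bJ (c :: cs) := by
  rw [bJ_alnum c cs h]
  simp [dropU, upperChar_ne_underscore c h]

lemma dropU_bJ (cs : List Char) :
    dropU (bJ cs) = bJ (cs.dropWhile (fun x => !PySem.Chars.isalnum x)) := by
  cases cs with
  | nil => simp [bJ, envPrefixParts, PySem.Chars.join, List.intercalate, dropU]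
  | cons c cs' =>
    by_cases hc : PySem.Chars.isalnum c = true
    · rw [head_bJ_ne c cs' hc, List.dropWhile_cons_of_neg (by simp [hc])]
    · rw [bJ_sep c cs' hc, List.dropWhile_cons_of_pos (by simp [hc])]
      simp [dropU]

lemma aRec_eq_bJ (cs : List Char) :
    aRec cs false = bJ cs ∧ aRec cs true = dropU (bJ cs) := by
  induction cs with
  | nil => constructor <;> simp [aRec, bJ, envPrefixParts, PySem.Chars.join, List.intercalate, dropU]
  | cons c cs ih =>
    by_cases hc : PySem.Chars.isalnum c = true
    · constructor
      · rw [aRec, if_pos hc, ih.1, bJ_alnum c cs hc]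
      · rw [aRec, if_pos hc, ih.1, ← bJ_alnum c cs hc, head_bJ_ne c cs hc]
    · constructor
      · rw [aRec, if_neg hc, if_neg (by simp), ih.2, dropU_bJ, bJ_sep c cs hc]
      · rw [aRec, if_neg hc, if_pos rfl, ih.2, dropU_bJ, bJ_sep c cs hc]
        simp [dropU]

lemma foldl_eq_aRec (cs : List Char) (acc : List Char) (b : Bool) :
    (cs.foldl
      (fun (st : List Char × Bool) ch =>
        if PySem.Chars.isalnum ch then (st.1 ++ [PySem.Chars.upperChar ch], false)
        else if st.2 then st
        else (st.1 ++ ['_'], true))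
      (acc, b)).1 = acc ++ aRec cs b := by
  induction cs generalizing acc b with
  | nil => simp [aRec]
  | cons c cs ih =>
    by_cases hc : PySem.Chars.isalnum c = true
    · simp only [List.foldl_cons, if_pos hc, aRec]
      rw [ih]; simp
    · cases b with
      | true =>
        rw [List.foldl_cons, if_neg hc, if_pos (show ((acc, true) : List Char × Bool).2 = true from rfl),
          aRec, if_neg hc, if_pos rfl]
        exact ih acc true
      | false =>
        rw [List.foldl_cons, if_neg hc, if_neg (show ¬(((acc, false) : List Char × Bool).2 = true) by simp),
          aRec, if_neg hc, if_neg (by simp), ih]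
        simp

lemma stripU_dropU (l : List Char) :
    PySem.Chars.stripChars (dropU l) ['_'] = PySem.Chars.stripChars l ['_'] := by
  cases l with
  | nil => rfl
  | cons c t =>
    by_cases hc : c = '_'
    · subst hc
      simp [dropU, PySem.Chars.stripChars, List.dropWhile]
    · simp [dropU, hc]

-- ===== VERDICT (by name: the statement is the Claim_ definition above) =====
theorem env_prefix_py_spec : Claim_equal_env_prefix_py := by
  intro slug _
  unfold Spec_env_prefix_py env_prefix_py env_prefix_py_alt
  rw [foldl_eq_aRec slug.toList [] true, List.nil_append,
    (aRec_eq_bJ slug.toList).2, stripU_dropU]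
  rfl
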